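-- pv_equiv track=rewrite | github.com/tingshuo-yiqing/wiki | algorithm/板刷AtCoder/2025-12/28/C_Separated_Lunch.py | bit_enum
-- ===== SOURCE A (Python) =====
-- inf = float('inf')
--
-- def bit_enum(n, time):
--     ans = inf
--     total = sum(time)
--     for i in range(1 << n):
--         temp = 0
--         for j in range(n):
--             if (i >> j) & 1:
--                 temp += time[j]
--         ans = min(ans, max(temp, total - temp))
--     return ans
-- ===== SOURCE B (Python) =====
-- def bit_enum(n, time):
--     total = sum(time)
--     reach = {0}
--     for j in range(n):
--         t = time[j]
--         reach |= {s + t for s in reach}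
--     return min(max(s, total - s) for s in reach)
-- ===== Notes on version B (the rewrite author's own statement) =====
-- stated objective: alternative
-- what changed: replaced the 2^n bitmask enumeration (recomputing each subset sum with an inner bit loop) by a subset-sum reachability set built in one pass over the first n times, then a single min over the reachable sums; intended as faster since duplicate subset sums are collapsed as they arise
import Mathlib
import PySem

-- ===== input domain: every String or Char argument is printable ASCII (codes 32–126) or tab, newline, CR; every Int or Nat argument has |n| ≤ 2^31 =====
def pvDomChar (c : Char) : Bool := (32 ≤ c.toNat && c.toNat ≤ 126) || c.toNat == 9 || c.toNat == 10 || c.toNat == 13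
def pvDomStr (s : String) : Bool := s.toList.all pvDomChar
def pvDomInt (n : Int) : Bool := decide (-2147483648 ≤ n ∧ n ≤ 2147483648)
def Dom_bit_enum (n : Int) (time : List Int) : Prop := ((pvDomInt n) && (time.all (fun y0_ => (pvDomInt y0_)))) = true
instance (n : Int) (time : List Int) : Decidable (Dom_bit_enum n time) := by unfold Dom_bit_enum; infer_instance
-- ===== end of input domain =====

-- B replaces A's 2^n-bitmask enumeration by a one-pass subset-sum reachability set, then a
-- single min over the reachable sums (a different algorithm, intended as faster: duplicate
-- subset sums are collapsed as they arise instead of being re-enumerated).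

-- ===== PORT A =====
-- 'ans = inf' is modelled by an Option Int accumulator (none = inf, min(inf, x) = x); the loop
-- runs at least once (range(1 << n) is nonempty for n ≥ 0), so the final '.getD 0' default is
-- never the result inside Pre_. time[j] is ported with pyGetD; Pre_ guarantees j in range
-- (Python raises IndexError otherwise). '1 << n' / 'i >> j' shift by n.toNat / j.toNat;
-- Pre_ (and the pyRange bound) give 0 ≤ n and 0 ≤ j wherever Python returns.

def bit_enum (n : Int) (time : List Int) : Int :=
  let total := time.sum
  let ans : Option Int :=
    (PySem.List.pyRange 0 ((1 : Int) <<< n.toNat) 1).foldl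
      (fun ans i =>
        let temp :=
          (PySem.List.pyRange 0 n 1).foldl
            (fun temp j =>
              if PySem.Int.band (i >>> j.toNat) 1 ≠ 0 then
                temp + PySem.List.pyGetD time j 0
              else temp) 0
        some (match ans with
              | none => max temp (total - temp)
              | some a => min a (max temp (total - temp))))
      none
  ans.getD 0

-- ===== PORT B =====
-- reach = {0}; for j in range(n): reach |= {s + time[j] for s in reach}; then min of max(s, total - s).
-- time[j] is ported with pyGetD (Pre_ keeps j in range, where Python raises IndexError).
-- Python's min iterates the set in hash order, but min without a key is order-independent.
-- 'min(generator)' over the always-nonempty reach is ported as min? … |>.getD 0 (never the default).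
def bit_enum_alt (n : Int) (time : List Int) : Int :=
  let total := time.sum
  let reach : PySem.Set Int :=
    (PySem.List.pyRange 0 n 1).foldl
      (fun r j =>
        let t := PySem.List.pyGetD time j 0
        PySem.Set.union r (PySem.Set.ofList (r.map (fun s => s + t))))
      (PySem.Set.ofList [0])
  (PySem.List.min? (reach.map (fun s => max s (total - s))) (fun x => x)).getD 0


-- ===== PRECONDITION & SPEC =====
-- A raises ValueError on n < 0 (negative shift count) and IndexError on n > len(time).
-- (B raises the same IndexError for n > len(time); for n < 0 A raises and B returns 'no items'.)
def Pre_bit_enum (n : Int) (time : List Int) : Prop := 0 ≤ n ∧ n ≤ (time.length : Int)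
instance (n : Int) (time : List Int) : Decidable (Pre_bit_enum n time) := by
  unfold Pre_bit_enum; infer_instance
def pvWitness_bit_enum : Int × List Int := (2, [3, 5])

def Spec_bit_enum (n : Int) (time : List Int) (out : Int) : Prop := out = bit_enum_alt n time
instance (n : Int) (time : List Int) (out : Int) : Decidable (Spec_bit_enum n time out) := by
  unfold Spec_bit_enum; infer_instance

-- ===== CLAIM (what is proved, stated in full; the proofs are below) =====
def Claim_equal_bit_enum : Prop := ∀ (n : Int) (time : List Int), Dom_bit_enum n time → Pre_bit_enum n time → Spec_bit_enum n time (bit_enum n time)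

-- ===== LEMMAS AND PROOFS =====

def tempA (time : List Int) (k : Nat) (m : Nat) : Int :=
  (List.range k).foldl (fun temp j => if m.testBit j then temp + time.getD j 0 else temp) 0

def aList (time : List Int) (k : Nat) : List Int := (List.range (2 ^ k)).map (tempA time k)

def rSet (xs : List Int) : PySem.Set Int :=
  xs.foldl (fun r t => PySem.Set.union r (PySem.Set.ofList (r.map (fun s => s + t))))
    (PySem.Set.ofList [0])
-- bit test bridge
theorem band_shift_testBit (m j : Nat) :
    (PySem.Int.band (@HShiftRight.hShiftRight Int Nat Int Int.instHShiftRightNat (m:Int) j) 1 ≠ 0)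
      ↔ m.testBit j := by
  have h : @HShiftRight.hShiftRight Int Nat Int Int.instHShiftRightNat (m:Int) j
      = ((m >>> j : Nat) : Int) := rfl
  have h2 : (1:Int) = ((1:Nat):Int) := rfl
  rw [h, h2, PySem.Int.band_natCast]
  rw [Ne, Int.natCast_eq_zero, Nat.and_one_is_mod, Nat.testBit, Nat.one_and_eq_mod_two]
  simp

-- inner loop = tempA
theorem inner_eq (time : List Int) (n : Int) (hn : 0 ≤ n) (m : Nat) :
    (PySem.List.pyRange 0 n 1).foldl
      (fun temp j =>
        if PySem.Int.band (@HShiftRight.hShiftRight Int Nat Int Int.instHShiftRightNat (m:Int) j.toNat) 1 ≠ 0 then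
          temp + PySem.List.pyGetD time j 0
        else temp) 0 = tempA time n.toNat m := by
  have h0 : n = ((n.toNat : Nat) : Int) := by omega
  rw [h0, PySem.List.pyRange_zero_natCast, List.foldl_map]
  unfold tempA
  apply PySem.List.foldl_congr_mem
  intro acc j _
  simp only [Int.toNat_natCast]
  rw [PySem.List.pyGetD_natCast]
  by_cases hb : m.testBit j
  · rw [if_pos ((band_shift_testBit m j).mpr hb), if_pos hb]
  · rw [if_neg (fun hc => hb ((band_shift_testBit m j).mp hc)), if_neg hb]

-- aList recursion
theorem tempA_succ_low (time : List Int) (k m : Nat) (hm : m < 2 ^ k) :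
    tempA time (k+1) m = tempA time k m := by
  unfold tempA
  rw [List.range_succ, List.foldl_append]
  simp [Nat.testBit_lt_two_pow hm]

theorem tempA_succ_high (time : List Int) (k m : Nat) (hm : m < 2 ^ k) :
    tempA time (k+1) (2 ^ k + m) = tempA time k m + time.getD k 0 := by
  unfold tempA
  rw [List.range_succ, List.foldl_append]
  have hcong : (List.range k).foldl
      (fun temp j => if (2 ^ k + m).testBit j then temp + time.getD j 0 else temp) 0 =
      (List.range k).foldl (fun temp j => if m.testBit j then temp + time.getD j 0 else temp) 0 := by
    apply PySem.List.foldl_congr_mem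
    intro acc j hj
    rw [Nat.testBit_two_pow_add_gt (List.mem_range.mp hj)]
  rw [hcong]
  simp [Nat.testBit_two_pow_add_eq, Nat.testBit_lt_two_pow hm]

theorem aList_succ (time : List Int) (k : Nat) :
    aList time (k+1) = aList time k ++ (aList time k).map (· + time.getD k 0) := by
  unfold aList
  have h : 2 ^ (k+1) = 2 ^ k + 2 ^ k := by ring
  rw [h, List.range_add, List.map_append, List.map_map, List.map_map]
  congr 1
  · exact List.map_congr_left (fun m hm => tempA_succ_low time k m (List.mem_range.mp hm))
  · exact List.map_congr_left (fun m hm => tempA_succ_high time k m (List.mem_range.mp hm))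

-- rSet membership step
theorem mem_rSet_append (xs : List Int) (t x : Int) :
    x ∈ rSet (xs ++ [t]) ↔ x ∈ rSet xs ∨ ∃ s ∈ rSet xs, x = s + t := by
  unfold rSet
  rw [List.foldl_append]
  simp only [List.foldl_cons, List.foldl_nil, PySem.Set.mem_union, PySem.Set.mem_ofList,
    List.mem_map]
  constructor
  · rintro (h | ⟨s, hs, rfl⟩)
    · exact Or.inl h
    · exact Or.inr ⟨s, hs, rfl⟩
  · rintro (h | ⟨s, hs, rfl⟩)
    · exact Or.inl h
    · exact Or.inr ⟨s, hs, rfl⟩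

theorem mem_aList_iff (time : List Int) : ∀ (k : Nat), k ≤ time.length →
    ∀ (x : Int), (x ∈ aList time k ↔ x ∈ rSet (time.take k)) := by
  intro k
  induction k with
  | zero =>
      intro _ x
      unfold aList tempA rSet
      simp
  | succ k ih =>
      intro hk x
      have hk' : k < time.length := by omega
      have hiff := ih (by omega)
      have htake : time.take (k+1) = time.take k ++ [time[k]] := by
        rw [List.take_add_one, List.getElem?_eq_getElem hk']
        rfl
      rw [htake, mem_rSet_append, aList_succ, List.mem_append, List.mem_map]
      rw [List.getD_eq_getElem time 0 hk']
      constructor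
      · rintro (h | ⟨s, hs, rfl⟩)
        · exact Or.inl ((hiff x).mp h)
        · exact Or.inr ⟨s, (hiff s).mp hs, rfl⟩
      · rintro (h | ⟨s, hs, rfl⟩)
        · exact Or.inl ((hiff x).mpr h)
        · exact Or.inr ⟨s, (hiff s).mpr hs, rfl⟩

-- same members ⇒ same min
theorem min_eq_of_mem_iff (x y : Int) (xs ys : List Int)
    (h : ∀ a, a ∈ x :: xs ↔ a ∈ y :: ys) :
    xs.foldl min x = ys.foldl min y := by
  have h1 := PySem.List.foldl_min_le xs x
  have h2 := PySem.List.foldl_min_le ys y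
  have hm1 : xs.foldl min x ∈ x :: xs := by
    rcases PySem.List.foldl_min_mem xs x with h | h
    · rw [h]; exact List.mem_cons_self
    · exact List.mem_cons_of_mem _ h
  have hm2 : ys.foldl min y ∈ y :: ys := by
    rcases PySem.List.foldl_min_mem ys y with h | h
    · rw [h]; exact List.mem_cons_self
    · exact List.mem_cons_of_mem _ h
  have hle1 : ∀ a ∈ x :: xs, xs.foldl min x ≤ a := by
    intro a ha
    rcases List.mem_cons.mp ha with rfl | ha
    · exact h1.1
    · exact h1.2 a ha
  have hle2 : ∀ a ∈ y :: ys, ys.foldl min y ≤ a := by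
    intro a ha
    rcases List.mem_cons.mp ha with rfl | ha
    · exact h2.1
    · exact h2.2 a ha
  exact le_antisymm (hle1 _ ((h _).mpr hm2)) (hle2 _ ((h _).mp hm1))

def omin (xs : List Int) : Option Int :=
  match xs with
  | [] => none
  | x :: t => some (t.foldl min x)

theorem foldmin_some {a : Type} (g : a → Int) (xs : List a) (b : Int) :
    xs.foldl (fun ans i => some (match ans with | none => g i | some b => min b (g i)))
      (some b) = some ((xs.map g).foldl min b) := by
  induction xs generalizing b with
  | nil => simp
  | cons x t ih => simp [ih]

theorem foldmin_eq_omin {a : Type} (g : a → Int) (xs : List a) :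
    xs.foldl (fun ans i => some (match ans with | none => g i | some b => min b (g i)))
      none = omin (xs.map g) := by
  cases xs with
  | nil => rfl
  | cons x t =>
      rw [List.foldl_cons]
      exact foldmin_some g t (g x)

theorem omin_congr (xs ys : List Int) (h : ∀ a, a ∈ xs ↔ a ∈ ys) : omin xs = omin ys := by
  cases xs with
  | nil =>
      cases ys with
      | nil => rfl
      | cons y ys' => exact absurd ((h y).mpr List.mem_cons_self) (List.not_mem_nil)
  | cons x xs' =>
      cases ys with
      | nil => exact absurd ((h x).mp List.mem_cons_self) (List.not_mem_nil)
      | cons y ys' => exact congrArg some (min_eq_of_mem_iff x y xs' ys' h)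

theorem pymin_eq_omin (ys : List Int) : PySem.List.min? ys (fun x => x) = omin ys := by
  cases ys with
  | nil => rfl
  | cons y t => rw [PySem.List.min?_id_cons]; rfl

theorem Aside (time : List Int) (n : Int) (h1 : 0 ≤ n) :
    bit_enum n time =
      (omin ((aList time n.toNat).map (fun s => max s (time.sum - s)))).getD 0 := by
  have hshift : (1:Int) <<< n.toNat = ((2 ^ n.toNat : Nat) : Int) := by
    rw [Int.shiftLeft_eq]; push_cast; ring
  simp only [bit_enum, hshift, PySem.List.pyRange_zero_natCast, List.foldl_map]
  simp only [inner_eq time n h1]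
  rw [foldmin_eq_omin (fun m => max (tempA time n.toNat m) (time.sum - tempA time n.toNat m))]
  unfold aList
  rw [List.map_map]
  rfl

theorem foldRange_take {b : Type} (f : b → Int → b) (xs : List Int) (init : b) :
    ∀ (k : Nat), k ≤ xs.length →
      (List.range k).foldl (fun acc j => f acc (xs.getD j 0)) init = (xs.take k).foldl f init := by
  intro k
  induction k with
  | zero => intro _; rfl
  | succ k ih =>
      intro hk
      have hk' : k < xs.length := by omega
      have htake : xs.take (k+1) = xs.take k ++ [xs[k]] := by
        rw [List.take_add_one, List.getElem?_eq_getElem hk']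
        rfl
      rw [List.range_succ, List.foldl_append, htake, List.foldl_append, ih (by omega)]
      simp only [List.foldl_cons, List.foldl_nil, List.getD_eq_getElem xs 0 hk']

theorem Bside (time : List Int) (n : Int) (h1 : 0 ≤ n) (h2 : n ≤ (time.length : Int)) :
    bit_enum_alt n time =
      (omin ((rSet (time.take n.toNat)).map (fun s => max s (time.sum - s)))).getD 0 := by
  have h0 : n = ((n.toNat : Nat) : Int) := by omega
  unfold rSet
  simp only [bit_enum_alt, pymin_eq_omin]
  rw [h0, PySem.List.pyRange_zero_natCast, List.foldl_map]
  simp only [PySem.List.pyGetD_natCast]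
  rw [foldRange_take
    (fun r t => PySem.Set.union r (PySem.Set.ofList (r.map (fun s => s + t))))
    time (PySem.Set.ofList [0]) n.toNat (by omega)]
  simp only [Int.toNat_natCast]

theorem final (n : Int) (time : List Int) (h1 : 0 ≤ n) (h2 : n ≤ (time.length : Int)) :
    bit_enum n time = bit_enum_alt n time := by
  rw [Aside time n h1, Bside time n h1 h2]
  congr 1
  apply omin_congr
  intro a
  simp only [List.mem_map]
  constructor
  · rintro ⟨s, hs, rfl⟩
    exact ⟨s, (mem_aList_iff time n.toNat (by omega) s).mp hs, rfl⟩
  · rintro ⟨s, hs, rfl⟩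
    exact ⟨s, (mem_aList_iff time n.toNat (by omega) s).mpr hs, rfl⟩

-- ===== VERDICT (by name: the statement is the Claim_ definition above) =====
theorem bit_enum_spec : Claim_equal_bit_enum := by
  intro n time _ hpre
  unfold Spec_bit_enum
  exact final n time hpre.1 hpre.2
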